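-- pv_equiv track=rewrite | github.com/alexbui91/compression | IntegerCodes.py | dec_to_headless
-- ===== SOURCE A (Python) =====
-- def dec_to_headless( n ):
--     """Return the headless binary representation of n, an integer >= 1
--
--     >>> [(n,dec_to_headless(n)) for n in range(1,8)]
--     [(1, ''), (2, '0'), (3, '1'), (4, '00'), (5, '01'), (6, '10'), (7, '11')]
--     >>> dec_to_headless(42)
--     '01010'
--     """
--     assert(n>=1)
--     ans=""
--     while n>1 :
--         b = ((1&n)>0)
--         ans =  str(int(b)) + ans
--         n >>= 1
--         pass
--     return ans
--     pass
-- ===== SOURCE B (Python) =====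
-- def dec_to_headless(n):
--     """Return the headless binary representation of n, an integer >= 1."""
--     assert n >= 1
--     return bin(n)[3:]
-- ===== Notes on version B (the rewrite author's own statement) =====
-- stated objective: idiomatic
-- what changed: Replaces the manual shift-and-prepend accumulator loop with one closed-form builtin call: bin(n)[3:] slices the '0b1' prefix off Python's binary rendering.
import Mathlib
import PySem

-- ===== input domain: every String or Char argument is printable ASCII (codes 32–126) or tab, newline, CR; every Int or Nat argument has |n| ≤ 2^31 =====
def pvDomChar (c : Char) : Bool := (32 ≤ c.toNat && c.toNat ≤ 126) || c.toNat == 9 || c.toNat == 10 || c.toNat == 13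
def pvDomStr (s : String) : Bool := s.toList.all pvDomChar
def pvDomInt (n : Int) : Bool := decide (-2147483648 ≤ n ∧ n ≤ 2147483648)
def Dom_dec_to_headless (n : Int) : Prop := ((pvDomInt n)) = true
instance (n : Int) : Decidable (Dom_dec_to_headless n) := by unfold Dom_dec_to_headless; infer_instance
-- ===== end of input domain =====

-- B replaces A's shift-and-prepend loop by the closed-form bin(n)[3:] (binary digits with the leading bit sliced off); return values proved equal for all n ≥ 1.


-- ===== PORT A =====
-- A's while loop: while n > 1, prepend the low bit's digit and shift right.
-- Exact for n ≥ 1 (Pre_ excludes n < 1, where A's assert raises); the loop state n stays ≥ 1, so Nat carries it.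
def decToHeadlessLoop : Nat → List Char → List Char
  | n, ans =>
    if h : n > 1 then
      decToHeadlessLoop (n / 2) ((if n % 2 = 1 then '1' else '0') :: ans)
    else ans
decreasing_by exact Nat.div_lt_self (by omega) (by omega)

def dec_to_headless (n : Int) : String := String.ofList (decToHeadlessLoop n.toNat [])

-- ===== PORT B =====
-- bin(n)[3:] : Python's binary rendering ported as Nat.toDigits 2, then drop the leading '1' (the '0b1' prefix slice).
def dec_to_headless_alt (n : Int) : String := String.ofList ((Nat.toDigits 2 n.toNat).drop 1)

-- ===== PRECONDITION & SPEC =====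
-- Pre_ excludes exactly n < 1, where A's `assert(n>=1)` raises AssertionError.
def Pre_dec_to_headless (n : Int) : Prop := 1 ≤ n
instance (n : Int) : Decidable (Pre_dec_to_headless n) := by unfold Pre_dec_to_headless; infer_instance
def pvWitness_dec_to_headless : Int := (42)

def Spec_dec_to_headless (n : Int) (out : String) : Prop := out = dec_to_headless_alt n
instance (n : Int) (out : String) : Decidable (Spec_dec_to_headless n out) := by unfold Spec_dec_to_headless; infer_instance

-- ===== CLAIM (what is proved, stated in full; the proofs are below) =====
def Claim_equal_dec_to_headless : Prop := ∀ (n : Int), Dom_dec_to_headless n → Pre_dec_to_headless n → Spec_dec_to_headless n (dec_to_headless n)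

-- ===== LEMMAS AND PROOFS =====

-- canonical headless bit list of n (MSB first, top bit removed)
def headlessRep : Nat → List Char
  | n =>
    if h : n > 1 then
      headlessRep (n / 2) ++ [if n % 2 = 1 then '1' else '0']
    else []
decreasing_by exact Nat.div_lt_self (by omega) (by omega)

theorem decToHeadlessLoop_eq (n : Nat) : ∀ ans, decToHeadlessLoop n ans = headlessRep n ++ ans := by
  induction n using Nat.strong_induction_on with
  | _ n ih =>
    intro ans
    rw [decToHeadlessLoop, headlessRep]
    by_cases h : n > 1
    · simp only [h, dif_pos]
      rw [ih (n / 2) (Nat.div_lt_self (by omega) (by omega))]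
      simp
    · simp [h]

theorem toDigitsCore_eq (fuel : Nat) : ∀ n ds, n < fuel → 1 ≤ n →
    Nat.toDigitsCore 2 fuel n ds = ('1' :: headlessRep n) ++ ds := by
  induction fuel with
  | zero => intro n ds hlt; omega
  | succ f ih =>
    intro n ds hlt h1
    rw [Nat.toDigitsCore, headlessRep]
    by_cases h : n > 1
    · have h2 : ¬ (n / 2 = 0) := by omega
      simp only [h2, h, dif_pos]
      rw [ih (n / 2) _ (by omega) (by omega)]
      have : Nat.digitChar (n % 2) = (if n % 2 = 1 then '1' else '0') := by
        have := Nat.mod_two_eq_zero_or_one n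
        rcases this with h0 | h0 <;> simp [h0, Nat.digitChar]
      simp [this]
    · have hn : n = 1 := by omega
      subst hn
      simp [Nat.digitChar]

theorem dec_to_headless_spec : Claim_equal_dec_to_headless := by
  intro n _ hpre
  unfold Spec_dec_to_headless dec_to_headless dec_to_headless_alt
  have h1 : 1 ≤ n.toNat := by
    unfold Pre_dec_to_headless at hpre; omega
  rw [decToHeadlessLoop_eq, Nat.toDigits, toDigitsCore_eq (n.toNat + 1) n.toNat [] (by omega) h1]
  simp
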